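-- pv_equiv track=rewrite | github.com/mbuhidar/retro_typein_tools | retrotype/retrotype.py | ahoy2_checksum
-- ===== SOURCE A (Python) =====
-- def ahoy2_checksum(byte_list):
--     '''
--     Function to create Ahoy checksums from passed in byte list to match the
--     codes printed in the magazine to check each line for typed in accuracy.
--     Covers Ahoy Bug Repellent version for May 1984-Apr 1987 issues.
--     '''
--
--     xor_value = 0
--     char_position = 1
--     carry_flag = 1
--     in_quotes = False
--
--     for char_val in byte_list:
--
--         # set carry flag to zero for char values less than ascii value for
--         # quote character since assembly code for repellent sets carry flag
--         # based on cmp 0x22 (decimal 34)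
--
--         carry_flag = 0 if char_val < 34 else 1
--
--         # Detect quote symbol in line and toggle in-quotes flag
--         if char_val == 34:
--             in_quotes = not in_quotes
--
--         # Detect spaces that are outside of quotes and ignore them, else
--         # execute primary checksum generation algorithm
--         if char_val == 32 and in_quotes is False:
--             continue
--
--         next_value = char_val + xor_value + carry_flag
--         xor_value = next_value ^ char_position
--
--         # limit next value to fit in one byte
--         next_value = next_value & 255
--
--         char_position = char_position + 1
--
--     # get high nibble of xor_value
--     high_nib = (xor_value & 0xf0) >> 4
--     high_char_val = high_nib + 65  # 0x41
--     # get low nibble of xor_value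
--     low_nib = xor_value & 0x0f
--     low_char_val = low_nib + 65  # 0x41
--     checksum = chr(high_char_val) + chr(low_char_val)
--     return checksum
-- ===== SOURCE B (Python) =====
-- def ahoy2_checksum(byte_list):
--     # Pass 1: drop spaces outside quotes; tag each surviving byte with its carry bit.
--     kept = []
--     in_quotes = False
--     for char_val in byte_list:
--         if char_val == 34:
--             in_quotes = not in_quotes
--         if char_val == 32 and not in_quotes:
--             continue
--         kept.append((char_val, 0 if char_val < 34 else 1))
--     # Pass 2: fold the tagged list into the xor accumulator.
--     xor_value = 0
--     char_position = 1
--     for char_val, carry in kept: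
--         xor_value = (char_val + xor_value + carry) ^ char_position
--         char_position += 1
--     high_nib = (xor_value & 0xF0) >> 4
--     low_nib = xor_value & 0x0F
--     return chr(high_nib + 65) + chr(low_nib + 65)
-- ===== Notes on version B (the rewrite author's own statement) =====
-- stated objective: alternative
-- what changed: Split A's single stateful loop into two passes: a filter pass that builds an intermediate list of (byte, carry) pairs (handling quote toggling and space skipping), then a pure fold computing the xor accumulator; the dead 'next_value & 255' statement is dropped.
import Mathlib
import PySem

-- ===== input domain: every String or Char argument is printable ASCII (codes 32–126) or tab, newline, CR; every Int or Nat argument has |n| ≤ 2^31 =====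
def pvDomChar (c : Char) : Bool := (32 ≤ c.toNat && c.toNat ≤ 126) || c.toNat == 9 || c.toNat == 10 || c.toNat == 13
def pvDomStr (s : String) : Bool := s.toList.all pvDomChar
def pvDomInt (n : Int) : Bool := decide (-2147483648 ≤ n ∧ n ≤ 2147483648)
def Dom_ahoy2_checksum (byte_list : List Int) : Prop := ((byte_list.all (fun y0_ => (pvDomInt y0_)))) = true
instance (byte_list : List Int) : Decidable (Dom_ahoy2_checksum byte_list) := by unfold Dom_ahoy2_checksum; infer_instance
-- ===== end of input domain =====

-- B replaces A's single stateful loop by a filter pass building a (byte, carry) list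
-- followed by a pure fold; same cost, different decomposition (objective: alternative).

-- ===== PORT A =====
-- state: (xor_value, char_position, carry_flag, in_quotes)
def ahoy2Step (s : Int × Int × Int × Bool) (char_val : Int) : Int × Int × Int × Bool :=
  let xor_value := s.1
  let char_position := s.2.1
  let in_quotes := s.2.2.2
  let carry_flag : Int := if char_val < 34 then 0 else 1
  let in_quotes := if char_val == 34 then !in_quotes else in_quotes
  if char_val == 32 && in_quotes == false then
    (xor_value, char_position, carry_flag, in_quotes)
  else
    let next_value := char_val + xor_value + carry_flag
    let xor_value := PySem.Int.bxor next_value char_position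
    let _next_value := PySem.Int.band next_value 255  -- dead in A's Python, kept for fidelity
    (xor_value, char_position + 1, carry_flag, in_quotes)

def ahoy2_checksum (byte_list : List Int) : String :=
  let st := byte_list.foldl ahoy2Step (0, 1, 1, false)
  let xor_value := st.1
  let high_nib := PySem.Int.band xor_value 0xf0 >>> (4:Nat)
  let high_char_val := high_nib + 65
  let low_nib := PySem.Int.band xor_value 0x0f
  let low_char_val := low_nib + 65
  String.ofList [Char.ofNat high_char_val.toNat, Char.ofNat low_char_val.toNat]

-- ===== PORT B =====
-- Pass 1: filter out spaces outside quotes, tagging each kept byte with its carry bit.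
def ahoy2AltPass1Step (s : List (Int × Int) × Bool) (char_val : Int) : List (Int × Int) × Bool :=
  let kept := s.1
  let in_quotes := s.2
  let in_quotes := if char_val == 34 then !in_quotes else in_quotes
  if char_val == 32 && !in_quotes then (kept, in_quotes)
  else (kept ++ [(char_val, if char_val < 34 then (0 : Int) else 1)], in_quotes)

-- Pass 2: pure fold over the tagged list, state (xor_value, char_position).
def ahoy2AltPass2Step (s : Int × Int) (cc : Int × Int) : Int × Int :=
  (PySem.Int.bxor (cc.1 + s.1 + cc.2) s.2, s.2 + 1)

def ahoy2_checksum_alt (byte_list : List Int) : String :=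
  let kept := (byte_list.foldl ahoy2AltPass1Step ([], false)).1
  let st := kept.foldl ahoy2AltPass2Step (0, 1)
  let xor_value := st.1
  let high_nib := PySem.Int.band xor_value 0xf0 >>> (4:Nat)
  let low_nib := PySem.Int.band xor_value 0x0f
  String.ofList [Char.ofNat (high_nib + 65).toNat, Char.ofNat (low_nib + 65).toNat]

-- ===== PRECONDITION & SPEC =====
def Spec_ahoy2_checksum (byte_list : List Int) (out : String) : Prop := out = ahoy2_checksum_alt byte_list
instance (byte_list : List Int) (out : String) : Decidable (Spec_ahoy2_checksum byte_list out) := by unfold Spec_ahoy2_checksum; infer_instance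

-- ===== CLAIM (what is proved, stated in full; the proofs are below) =====
def Claim_equal_ahoy2_checksum : Prop := ∀ (byte_list : List Int), Dom_ahoy2_checksum byte_list → Spec_ahoy2_checksum byte_list (ahoy2_checksum byte_list)

-- ===== LEMMAS AND PROOFS =====

-- recursion-form of B's first pass, used only inside the proof
def pass1core : List Int → Bool → List (Int × Int)
  | [], _ => []
  | c :: rest, inq =>
    let inq' := if c == 34 then !inq else inq
    if c == 32 && !inq' then pass1core rest inq'
    else (c, if c < 34 then (0 : Int) else 1) :: pass1core rest inq'

theorem pass1_foldl (l : List Int) (acc : List (Int × Int)) (inq : Bool) :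
    (l.foldl ahoy2AltPass1Step (acc, inq)).1 = acc ++ pass1core l inq := by
  induction l generalizing acc inq with
  | nil => simp [pass1core]
  | cons c rest ih =>
    simp only [List.foldl_cons, ahoy2AltPass1Step, pass1core]
    split_ifs with h <;> simp [ih]

theorem main_loop (l : List Int) (x p c : Int) (inq : Bool) :
    ((l.foldl ahoy2Step (x, p, c, inq)).1, (l.foldl ahoy2Step (x, p, c, inq)).2.1)
      = (pass1core l inq).foldl ahoy2AltPass2Step (x, p) := by
  induction l generalizing x p c inq with
  | nil => simp [pass1core]
  | cons cv rest ih =>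
    by_cases h34 : cv = 34
    · subst h34
      simp [List.foldl_cons, ahoy2Step, pass1core, ahoy2AltPass2Step, ih]
    · have e34 : (cv == 34) = false := by simp [h34]
      by_cases h32 : cv = 32
      · subst h32
        cases inq with
        | false => simp [List.foldl_cons, ahoy2Step, pass1core, e34, ih]
        | true => simp [List.foldl_cons, ahoy2Step, pass1core, ahoy2AltPass2Step, e34, ih]
      · have e32 : (cv == 32) = false := by simp [h32]
        by_cases hlt : cv < 34
        · simp [List.foldl_cons, ahoy2Step, pass1core, ahoy2AltPass2Step, e34, e32, hlt, ih]
        · simp [List.foldl_cons, ahoy2Step, pass1core, ahoy2AltPass2Step, e34, e32, hlt, ih]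

-- ===== VERDICT (by name: the statement is the Claim_ definition above) =====
theorem ahoy2_checksum_spec : Claim_equal_ahoy2_checksum := by
  intro l _
  unfold Spec_ahoy2_checksum ahoy2_checksum ahoy2_checksum_alt
  have h1 := pass1_foldl l [] false
  have h2 := main_loop l 0 1 1 false
  simp only [List.nil_append] at h1
  have hx : ((pass1core l false).foldl ahoy2AltPass2Step (0, 1)).1
      = (l.foldl ahoy2Step (0, 1, 1, false)).1 := by rw [← h2]
  simp only [h1, hx]
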